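-- pv_equiv track=rewrite | github.com/Dsy2024/Travel_Planner | Scrape/arrange.py | expand_days
-- ===== SOURCE A (Python) =====
-- weekdays = ['Monday', 'Tuesday', 'Wednesday', 'Thursday', 'Friday', 'Saturday', 'Sunday']
--
-- def expand_days(day_range):
--     # 將多個範圍或單個天數分割開來
--     day_parts = day_range.split(',')
--     expanded_days = []
--
--     for part in day_parts:
--         if '-' in part:
--             # 如果包含範圍，則擴展範圍
--             start_day, end_day = part.split('-')
--             start_index = weekdays.index(start_day.strip())
--             end_index = weekdays.index(end_day.strip())
--
--             if start_index <= end_index: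
--                 # 正常範圍內的天數
--                 expanded_days.extend(weekdays[start_index:end_index + 1])
--             else:
--                 # 如果範圍跨過了週末（如 Friday-Monday）
--                 expanded_days.extend(weekdays[start_index:] + weekdays[:end_index + 1])
--         else:
--             # 如果是單個天數，直接添加
--             expanded_days.append(part.strip())
--
--     return expanded_days
-- ===== SOURCE B (Python) =====
-- weekdays = ['Monday', 'Tuesday', 'Wednesday', 'Thursday', 'Friday', 'Saturday', 'Sunday']
-- _twice = weekdays + weekdays
--
-- def _range_days(start_day, end_day):
--     # one slice of the doubled week: from start to the first end at/after it
--     i = _twice.index(start_day)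
--     j = _twice.index(end_day, i)
--     return _twice[i:j + 1]
--
-- def expand_days(day_range):
--     head, sep, rest = day_range.partition(',')
--     if '-' in head:
--         start, _, end = head.partition('-')
--         days = _range_days(start.strip(), end.strip())
--     else:
--         days = [head.strip()]
--     if sep:
--         return days + expand_days(rest)
--     return days
-- ===== Notes on version B (the rewrite author's own statement) =====
-- stated objective: alternative
-- what changed: B recurses on the string via str.partition instead of looping over the comma-split list, and expands a ranged part as a single slice of a doubled week list (index of start, then index of end searched from there) instead of A's wrap/no-wrap slice branches on compared indices.
import Mathlib
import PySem

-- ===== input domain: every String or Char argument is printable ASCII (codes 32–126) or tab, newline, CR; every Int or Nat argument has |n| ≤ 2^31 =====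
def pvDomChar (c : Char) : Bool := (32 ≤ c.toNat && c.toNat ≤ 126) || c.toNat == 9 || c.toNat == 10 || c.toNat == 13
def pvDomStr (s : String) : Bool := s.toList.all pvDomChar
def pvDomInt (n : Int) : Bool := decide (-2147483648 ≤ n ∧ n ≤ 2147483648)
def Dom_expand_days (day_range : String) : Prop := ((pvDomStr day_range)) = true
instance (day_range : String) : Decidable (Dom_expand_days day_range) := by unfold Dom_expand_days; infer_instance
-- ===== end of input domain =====

-- B recurses on the string with str.partition instead of looping over the comma-split list, and expands a
-- ranged part as one slice of a doubled week list instead of A's wrap/no-wrap branches (objective: alternative).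

-- ===== PORT A =====
-- s.split(sep) for a nonempty literal sep: PySem.Str.split? is some there, exactly Python's split.
def pvSplit (s sep : String) : List String := (PySem.Str.split? s sep).getD []

def pvWeekdays : List String :=
  ["Monday", "Tuesday", "Wednesday", "Thursday", "Friday", "Saturday", "Sunday"]

-- Option threads Python's ValueError (bad day name / wrong unpack arity); Pre_ excludes exactly the none cases.
def pvStepA (acc : Option (List String)) (part : String) : Option (List String) :=
  match acc with
  | none => none
  | some days =>
    if PySem.Str.isIn "-" part then
      match pvSplit part "-" with
      | [start_day, end_day] =>
        match PySem.List.index? pvWeekdays (PySem.Str.strip start_day),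
              PySem.List.index? pvWeekdays (PySem.Str.strip end_day) with
        | some start_index, some end_index =>
          if start_index ≤ end_index then
            some (days ++ PySem.List.slice pvWeekdays (some (start_index : Int)) (some ((end_index : Int) + 1)))
          else
            some (days ++ (PySem.List.slice pvWeekdays (some (start_index : Int)) none ++
                           PySem.List.slice pvWeekdays none (some ((end_index : Int) + 1))))
        | _, _ => none
      | _ => none
    else some (days ++ [PySem.Str.strip part])

def expand_days (day_range : String) : List String :=
  ((pvSplit day_range ",").foldl pvStepA (some [])).getD []

-- ===== PORT B =====
def pvTwice : List String := pvWeekdays ++ pvWeekdays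

-- list.index(v, start) (search from position `start`): hand port — PySem.List.index? has no start
-- argument; searching the dropped prefix and re-offsetting is exact.
def pvIndexFrom (xs : List String) (v : String) (start : Nat) : Option Nat :=
  (PySem.List.index? (xs.drop start) v).map (· + start)

-- none threads the ValueError of list.index, as in port A.
def pvRangeDays (start_day end_day : String) : Option (List String) :=
  match PySem.List.index? pvTwice start_day with
  | none => none
  | some i =>
    match pvIndexFrom pvTwice end_day i with
    | none => none
    | some j => some (PySem.List.slice pvTwice (some (i : Int)) (some ((j : Int) + 1)))

-- str.partition(sep) for a single-character sep: hand port (split at the FIRST occurrence) — exact.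
def pvPartitionChar : List Char → Char → List Char × Bool × List Char
  | [], _ => ([], false, [])
  | x :: xs, c =>
    if x = c then ([], true, xs)
    else
      let p := pvPartitionChar xs c
      (x :: p.1, p.2.1, p.2.2)

-- termination helper for pvExpandChars (cited in decreasing_by)
lemma pvPartitionChar_found_len : ∀ (cs : List Char) (c : Char) (h r : List Char),
    pvPartitionChar cs c = (h, true, r) → r.length < cs.length := by
  intro cs c
  induction cs with
  | nil => intro h r hEq; simp [pvPartitionChar] at hEq
  | cons x xs ih =>
    intro h r hEq
    by_cases hx : x = c
    · simp [pvPartitionChar, hx] at hEq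
      obtain ⟨-, hxs⟩ := hEq
      subst hxs
      simp
    · simp [pvPartitionChar, hx] at hEq
      have h2 : (pvPartitionChar xs c).2 = (true, r) := hEq.2
      have hxs : pvPartitionChar xs c = ((pvPartitionChar xs c).1, true, r) := by rw [← h2]
      have := ih (pvPartitionChar xs c).1 r hxs
      simp only [List.length_cons]
      omega

def pvExpandChars (cs : List Char) : Option (List String) :=
  match hp : pvPartitionChar cs ',' with
  | (headCs, sep, restCs) =>
    let head := String.ofList headCs
    let days? : Option (List String) :=
      if PySem.Str.isIn "-" head then
        match pvPartitionChar head.toList '-' with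
        | (sCs, _, eCs) =>
          pvRangeDays (PySem.Str.strip (String.ofList sCs)) (PySem.Str.strip (String.ofList eCs))
      else some [PySem.Str.strip head]
    if hsep : sep = true then
      match days?, pvExpandChars restCs with
      | some d, some t => some (d ++ t)
      | _, _ => none
    else days?
termination_by cs.length
decreasing_by exact pvPartitionChar_found_len cs ',' headCs restCs (hsep ▸ hp)

def expand_days_alt (day_range : String) : List String :=
  (pvExpandChars day_range.toList).getD []

-- ===== PRECONDITION & SPEC =====
-- Pre_ excludes exactly the inputs on which A raises ValueError: a dashed (ranged) part that does not split
-- into exactly two pieces, or whose stripped pieces are not weekday names.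
def Pre_expand_days (day_range : String) : Prop :=
  ∀ part ∈ pvSplit day_range ",",
    PySem.Str.isIn "-" part = true →
      ((pvSplit part "-").length = 2 ∧
       ∀ q ∈ pvSplit part "-", PySem.Str.strip q ∈ pvWeekdays)
instance (day_range : String) : Decidable (Pre_expand_days day_range) := by
  unfold Pre_expand_days; infer_instance

def pvWitness_expand_days : String := "Monday, Friday-Tuesday"

def Spec_expand_days (day_range : String) (out : List String) : Prop := out = expand_days_alt day_range
instance (day_range : String) (out : List String) : Decidable (Spec_expand_days day_range out) := by unfold Spec_expand_days; infer_instance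

-- ===== CLAIM (what is proved, stated in full; the proofs are below) =====
def Claim_equal_expand_days : Prop := ∀ (day_range : String), Dom_expand_days day_range → Pre_expand_days day_range → Spec_expand_days day_range (expand_days day_range)

-- ===== LEMMAS AND PROOFS =====

-- Recursive characterization of single-char split, phrased through pvPartitionChar.
def pvSplitRec (c : Char) (cs : List Char) : List (List Char) :=
  match hp : pvPartitionChar cs c with
  | (h, false, _) => [h]
  | (h, true, r) => h :: pvSplitRec c r
termination_by cs.length
decreasing_by exact pvPartitionChar_found_len cs c h r hp

lemma pvSplitRec_unfold (c : Char) (cs h r : List Char) (f : Bool)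
    (hp : pvPartitionChar cs c = (h, f, r)) :
    pvSplitRec c cs = if f then h :: pvSplitRec c r else [h] := by
  rw [pvSplitRec]
  split
  · next h' s' heq =>
      rw [hp] at heq
      simp only [Prod.mk.injEq] at heq
      obtain ⟨rfl, rfl, rfl⟩ := heq
      simp
  · next h' r' heq =>
      rw [hp] at heq
      simp only [Prod.mk.injEq] at heq
      obtain ⟨rfl, rfl, rfl⟩ := heq
      simp

lemma pvSplitRec_ne_nil (c : Char) (cs : List Char) : pvSplitRec c cs ≠ [] := by
  rcases hp : pvPartitionChar cs c with ⟨h, f, r⟩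
  rw [pvSplitRec_unfold c cs h r f hp]
  cases f <;> simp

lemma pvSplitRec_nil (c : Char) : pvSplitRec c [] = [[]] := by
  rw [pvSplitRec_unfold c [] [] [] false rfl]
  simp

lemma pvSplitRec_cons_eq (c : Char) (xs : List Char) :
    pvSplitRec c (c :: xs) = [] :: pvSplitRec c xs := by
  rw [pvSplitRec_unfold c (c :: xs) [] xs true (by simp [pvPartitionChar])]
  simp

lemma pvSplitRec_cons_ne (c x : Char) (xs : List Char) (hx : x ≠ c) :
    pvSplitRec c (x :: xs) = (pvSplitRec c xs).modifyHead (x :: ·) := by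
  rcases hp : pvPartitionChar xs c with ⟨h, f, r⟩
  have hcons : pvPartitionChar (x :: xs) c = (x :: h, f, r) := by
    simp [pvPartitionChar, hx, hp]
  rw [pvSplitRec_unfold c (x :: xs) (x :: h) r f hcons,
      pvSplitRec_unfold c xs h r f hp]
  cases f <;> simp

-- splitOn.go with enough fuel computes pvSplitRec.
lemma pvGo_single (c : Char) : ∀ (cs : List Char) (fuel : Nat) (cur : List Char)
    (acc : List (List Char)), cs.length < fuel →
    PySem.Chars.splitOn.go [c] fuel cs cur acc =
      acc.reverse ++ (pvSplitRec c cs).modifyHead (cur.reverse ++ ·) := by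
  intro cs
  induction cs with
  | nil =>
    intro fuel cur acc hf
    match fuel, hf with
    | fuel + 1, _ =>
      simp [PySem.Chars.splitOn.go, pvSplitRec_nil]
  | cons x xs ih =>
    intro fuel cur acc hf
    match fuel, hf with
    | fuel + 1, hf =>
      by_cases hx : x = c
      · subst hx
        have hpre : [x].isPrefixOf (x :: xs) = true := by simp [List.isPrefixOf]
        simp only [PySem.Chars.splitOn.go, hpre, if_true, List.length_cons, List.drop_succ_cons,
          List.length_nil, List.drop_zero]
        rw [ih fuel [] (cur.reverse :: acc) (by simpa using Nat.lt_of_succ_lt_succ hf)]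
        simp only [pvSplitRec_cons_eq, List.modifyHead_cons, List.reverse_cons,
          List.append_assoc, List.singleton_append, List.append_nil, List.reverse_nil,
          List.nil_append]
        rw [show (fun x : List Char => x) = id from rfl, List.modifyHead_id]
        rfl
      · have hpre : [c].isPrefixOf (x :: xs) = false := by
          simp [List.isPrefixOf]; exact fun h => absurd h.symm hx
        simp only [PySem.Chars.splitOn.go, hpre]
        rw [ih fuel (x :: cur) acc (by simpa using Nat.lt_of_succ_lt_succ hf)]
        rw [pvSplitRec_cons_ne c x xs hx]
        rcases hs : pvSplitRec c xs with _ | ⟨h, t⟩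
        · exact absurd hs (pvSplitRec_ne_nil c xs)
        · simp

lemma pvSplit_single (s : String) (sep : String) (c : Char) (hsep : sep.toList = [c]) :
    pvSplit s sep = (pvSplitRec c s.toList).map String.ofList := by
  unfold pvSplit
  rw [PySem.Str.split?]
  rw [hsep]
  rw [PySem.Chars.split?]
  simp only [List.isEmpty_cons, Bool.false_eq_true, if_false, Option.map_some, Option.getD_some]
  rw [PySem.Chars.splitOn]
  rw [pvGo_single c s.toList (s.toList.length + 1) [] [] (by omega)]
  rcases hs : pvSplitRec c s.toList with _ | ⟨h, t⟩
  · exact absurd hs (pvSplitRec_ne_nil c s.toList)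
  · simp

-- per-part chunk (proof helper): the list A appends for one good part
def pvChunk (part : String) : List String := (pvStepA (some []) part).getD []

def pvGood (part : String) : Prop :=
  PySem.Str.isIn "-" part = true →
    ((pvSplit part "-").length = 2 ∧ ∀ q ∈ pvSplit part "-", PySem.Str.strip q ∈ pvWeekdays)

lemma pvIndex_lt {s : String} {k : Nat} (h : PySem.List.index? pvWeekdays s = some k) : k < 7 := by
  obtain ⟨hk, -, -⟩ := PySem.List.getElem_of_index?_eq_some h
  simpa using hk

lemma pvPartitionChar_not_found : ∀ (cs : List Char) (c : Char) (h r : List Char),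
    pvPartitionChar cs c = (h, false, r) → h = cs := by
  intro cs c
  induction cs with
  | nil => intro h r hEq; simp [pvPartitionChar] at hEq; simp [hEq.1.symm]
  | cons x xs ih =>
    intro h r hEq
    by_cases hx : x = c
    · simp [pvPartitionChar, hx] at hEq
    · simp [pvPartitionChar, hx] at hEq
      have h2 : (pvPartitionChar xs c).2 = (false, r) := hEq.2
      have hxs : pvPartitionChar xs c = ((pvPartitionChar xs c).1, false, r) := by rw [← h2]
      have := ih (pvPartitionChar xs c).1 r hxs
      rw [← hEq.1, this]

lemma pvStepA_good (part : String) (hg : pvGood part) (days : List String) :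
    pvStepA (some days) part = some (days ++ pvChunk part) := by
  by_cases hin : PySem.Str.isIn "-" part = true
  · obtain ⟨hlen, hmem⟩ := hg hin
    obtain ⟨sd, ed, hsplit⟩ : ∃ sd ed, pvSplit part "-" = [sd, ed] := by
      match hp : pvSplit part "-" with
      | [a, b] => exact ⟨a, b, rfl⟩
      | [] | [_] | _ :: _ :: _ :: _ => (rw [hp] at hlen; simp at hlen)
    have hsd : PySem.Str.strip sd ∈ pvWeekdays := hmem sd (by rw [hsplit]; simp)
    have hed : PySem.Str.strip ed ∈ pvWeekdays := hmem ed (by rw [hsplit]; simp)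
    obtain ⟨si, hsi⟩ := Option.isSome_iff_exists.mp
      ((PySem.List.index?_isSome_iff pvWeekdays (PySem.Str.strip sd)).mpr hsd)
    obtain ⟨ei, hei⟩ := Option.isSome_iff_exists.mp
      ((PySem.List.index?_isSome_iff pvWeekdays (PySem.Str.strip ed)).mpr hed)
    simp only [pvStepA, pvChunk, hin, if_pos, hsplit, hsi, hei]
    split_ifs <;> simp
  · simp only [pvStepA, pvChunk]
    rw [if_neg hin, if_neg hin]
    simp

lemma pvFoldA_good (parts : List String) (hg : ∀ p ∈ parts, pvGood p) (days : List String) :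
    parts.foldl pvStepA (some days) = some (days ++ parts.flatMap pvChunk) := by
  induction parts generalizing days with
  | nil => simp
  | cons p ps ih =>
    simp only [List.foldl_cons]
    rw [pvStepA_good p (hg p (by simp)) days,
      ih (fun q hq => hg q (by simp [hq])) (days ++ pvChunk p)]
    simp

-- B's range expansion equals A's branch result, for every pair of weekday indices (49 cases).
lemma pvRangeDays_eq : ∀ si ∈ List.range 7, ∀ ei ∈ List.range 7,
    pvRangeDays (pvWeekdays.getD si "") (pvWeekdays.getD ei "") =
      some (if si ≤ ei then
              PySem.List.slice pvWeekdays (some (si : Int)) (some ((ei : Int) + 1))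
            else
              PySem.List.slice pvWeekdays (some (si : Int)) none ++
              PySem.List.slice pvWeekdays none (some ((ei : Int) + 1))) := by
  decide

-- B's per-part computation agrees with pvChunk on good parts.
lemma pvPart_good (headCs : List Char) (hg : pvGood (String.ofList headCs)) :
    (if PySem.Str.isIn "-" (String.ofList headCs) then
      match pvPartitionChar (String.ofList headCs).toList '-' with
      | (sCs, _, eCs) =>
        pvRangeDays (PySem.Str.strip (String.ofList sCs)) (PySem.Str.strip (String.ofList eCs))
     else some [PySem.Str.strip (String.ofList headCs)])
    = some (pvChunk (String.ofList headCs)) := by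
  by_cases hin : PySem.Str.isIn "-" (String.ofList headCs) = true
  · obtain ⟨hlen, hmem⟩ := hg hin
    have hform := pvSplit_single (String.ofList headCs) "-" '-' (by decide)
    rw [String.toList_ofList] at hform
    -- the split has exactly two pieces: recover the partition of headCs at '-'
    rcases hp : pvPartitionChar headCs '-' with ⟨sCs, f, eCs⟩
    have hrec := pvSplitRec_unfold '-' headCs sCs eCs f hp
    cases f with
    | false =>
      rw [hrec] at hform
      rw [hform] at hlen
      simp at hlen
    | true =>
      rw [hrec, if_pos rfl] at hform
      -- the tail split is a single piece equal to eCs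
      rcases hp2 : pvPartitionChar eCs '-' with ⟨h2, f2, r2⟩
      have hrec2 := pvSplitRec_unfold '-' eCs h2 r2 f2 hp2
      cases f2 with
      | true =>
        rw [hform, hrec2, if_pos rfl] at hlen
        rcases hne : pvSplitRec '-' r2 with _ | ⟨a, t⟩
        · exact absurd hne (pvSplitRec_ne_nil '-' r2)
        · rw [hne] at hlen; simp at hlen
      | false =>
        have h2eq : h2 = eCs := pvPartitionChar_not_found eCs '-' h2 r2 hp2
        rw [hrec2, if_neg (by simp), h2eq] at hform
        have hsplit : pvSplit (String.ofList headCs) "-" =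
            [String.ofList sCs, String.ofList eCs] := by rw [hform]; rfl
        have hsd : PySem.Str.strip (String.ofList sCs) ∈ pvWeekdays :=
          hmem _ (by rw [hsplit]; simp)
        have hed : PySem.Str.strip (String.ofList eCs) ∈ pvWeekdays :=
          hmem _ (by rw [hsplit]; simp)
        obtain ⟨si, hsi⟩ := Option.isSome_iff_exists.mp
          ((PySem.List.index?_isSome_iff pvWeekdays _).mpr hsd)
        obtain ⟨ei, hei⟩ := Option.isSome_iff_exists.mp
          ((PySem.List.index?_isSome_iff pvWeekdays _).mpr hed)
        have hsi7 : si < 7 := pvIndex_lt hsi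
        have hei7 : ei < 7 := pvIndex_lt hei
        obtain ⟨hks, hgs, -⟩ := PySem.List.getElem_of_index?_eq_some hsi
        obtain ⟨hke, hge, -⟩ := PySem.List.getElem_of_index?_eq_some hei
        have hsv : PySem.Str.strip (String.ofList sCs) = pvWeekdays.getD si "" := by
          rw [List.getD_eq_getElem pvWeekdays "" hks]; exact hgs.symm
        have hev : PySem.Str.strip (String.ofList eCs) = pvWeekdays.getD ei "" := by
          rw [List.getD_eq_getElem pvWeekdays "" hke]; exact hge.symm
        have hrange := pvRangeDays_eq si (by simpa using hsi7) ei (by simpa using hei7)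
        rw [if_pos hin, String.toList_ofList, hp]
        dsimp only
        rw [hsv, hev, hrange]
        simp only [pvChunk, pvStepA, hin, if_pos, hsplit, hsi, hei]
        split_ifs <;> simp
  · rw [if_neg hin]
    simp only [pvChunk, pvStepA]
    rw [if_neg hin]
    simp

lemma pvExpandChars_good_aux : ∀ (n : Nat) (cs : List Char), cs.length ≤ n →
    (∀ p ∈ (pvSplitRec ',' cs).map String.ofList, pvGood p) →
    pvExpandChars cs = some (((pvSplitRec ',' cs).map String.ofList).flatMap pvChunk) := by
  intro n
  induction n with
  | zero =>
    intro cs hn hg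
    have hcs : cs = [] := List.length_eq_zero_iff.mp (Nat.le_zero.mp hn)
    subst hcs
    rw [pvExpandChars, pvSplitRec_nil]
    have := pvPart_good [] (by
      have := hg (String.ofList []) (by rw [pvSplitRec_nil]; simp)
      exact this)
    simpa [pvPartitionChar] using this
  | succ n ih =>
    intro cs hn hg
    rw [pvExpandChars]
    split
    next headCs sep restCs heq =>
      have hrec := pvSplitRec_unfold ',' cs headCs restCs sep heq
      cases sep with
      | false =>
        rw [hrec] at hg ⊢
        have hpart := pvPart_good headCs (hg (String.ofList headCs) (by simp))
        simp only [dite_eq_ite, Bool.false_eq_true, if_false]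
        rw [hpart]
        simp
      | true =>
        rw [hrec] at hg ⊢
        have hpart := pvPart_good headCs (hg (String.ofList headCs) (by simp))
        have hlt : restCs.length < cs.length :=
          pvPartitionChar_found_len cs ',' headCs restCs heq
        have htail := ih restCs (by omega) (fun p hp => hg p (by simp [hp]))
        simp only [dite_eq_ite, if_pos]
        rw [hpart, htail]
        simp

lemma pvExpandChars_good (cs : List Char)
    (hg : ∀ p ∈ (pvSplitRec ',' cs).map String.ofList, pvGood p) :
    pvExpandChars cs = some (((pvSplitRec ',' cs).map String.ofList).flatMap pvChunk) := by
  exact pvExpandChars_good_aux cs.length cs le_rfl hg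

-- ===== VERDICT (by name: the statement is the Claim_ definition above) =====
theorem expand_days_spec : Claim_equal_expand_days := by
  intro day_range _ hpre
  unfold Spec_expand_days expand_days expand_days_alt
  have hsplit := pvSplit_single day_range "," ',' (by decide)
  have hg : ∀ p ∈ (pvSplitRec ',' day_range.toList).map String.ofList, pvGood p := by
    intro p hp
    exact hpre p (by rw [hsplit]; exact hp)
  rw [hsplit, pvFoldA_good _ hg [], pvExpandChars_good day_range.toList hg]
  simp
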